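-- pv_equiv track=rewrite | github.com/evayatr157/MyNewGameProject | gameLogic.py | check_all_outs_reach_all_ins
-- ===== SOURCE A (Python) =====
-- def check_all_outs_reach_all_ins(V, E, S):
--     """
--     Checks strong connectivity for the player's subgraph.
--     Every OUT node must be able to reach all IN nodes.
--     Uses BFS on the entire graph (V, E).
--     """
--     adj = {v: [] for v in V}
--     for u, v in E:
--         adj.setdefault(u, []).append(v)
--
--     outs = [v for v in S if v[2] == 1]
--     ins = [v for v in S if v[2] == -1]
--
--     if not ins:
--         return True
--     if not outs:
--         return False
--
--     for out_v in outs: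
--         visited = set()
--         queue = [out_v]
--
--         while queue:
--             node = queue.pop(0)
--             if node not in visited:
--                 visited.add(node)
--                 for nbr in adj.get(node, []):
--                     if nbr not in visited:
--                         queue.append(nbr)
--
--         if not all(in_v in visited for in_v in ins):
--             return False
--
--     return True
-- ===== SOURCE B (Python) =====
-- def check_all_outs_reach_all_ins(V, E, S):
--     """Same check, but with ONE global saturation of a reachable-pairs set
--     (seeded with (out, out) for every OUT node, repeatedly extended by one
--     edge until closed) instead of a separate BFS per OUT node."""
--     outs = [v for v in S if v[2] == 1]
--     ins = [v for v in S if v[2] == -1]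
--     if not ins:
--         return True
--     if not outs:
--         return False
--
--     adj = {}
--     for u, v in E:
--         adj.setdefault(tuple(u), []).append(tuple(v))
--
--     reach = {(tuple(o), tuple(o)) for o in outs}
--     for _ in range(len(S) * (len(S) + len(E)) + 1):
--         new = set()
--         for a, b in reach:
--             for v in adj.get(b, ()):
--                 if (a, v) not in reach:
--                     new.add((a, v))
--         if not new:
--             break
--         reach |= new
--
--     return all((tuple(o), tuple(i)) in reach for o in outs for i in ins)
-- ===== Notes on version B (the rewrite author's own statement) =====
-- stated objective: alternative
-- what changed: The per-OUT-node BFS with an explicit queue is replaced by one global reachable-pairs set seeded with (out,out) for every OUT node and saturated by extending pairs one edge at a time until closed, then a single all() over out/in pairs.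
import Mathlib
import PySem

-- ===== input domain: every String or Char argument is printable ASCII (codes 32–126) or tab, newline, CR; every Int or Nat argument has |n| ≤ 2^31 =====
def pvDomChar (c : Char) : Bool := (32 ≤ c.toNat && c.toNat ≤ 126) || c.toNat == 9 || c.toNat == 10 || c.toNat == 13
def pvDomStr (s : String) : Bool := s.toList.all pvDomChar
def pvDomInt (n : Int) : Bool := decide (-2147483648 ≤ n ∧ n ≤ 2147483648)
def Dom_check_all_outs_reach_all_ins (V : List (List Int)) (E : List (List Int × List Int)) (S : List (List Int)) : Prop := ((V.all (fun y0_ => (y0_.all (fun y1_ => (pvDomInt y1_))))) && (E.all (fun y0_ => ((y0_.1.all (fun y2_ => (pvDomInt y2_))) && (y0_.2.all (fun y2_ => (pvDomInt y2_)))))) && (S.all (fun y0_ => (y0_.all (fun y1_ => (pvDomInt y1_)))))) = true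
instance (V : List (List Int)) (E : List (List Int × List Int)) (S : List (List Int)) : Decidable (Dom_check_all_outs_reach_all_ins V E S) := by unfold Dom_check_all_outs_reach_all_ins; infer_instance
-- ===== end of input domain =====

-- B replaces A's per-OUT-node BFS by one global reachable-pairs set, seeded reflexively at the
-- OUT nodes and saturated one edge-extension round at a time until closed (objective: alternative).

-- ===== PORT A =====
-- adj = {v: [] for v in V}; then adj.setdefault(u, []).append(v) per edge (= Dict.modify).
def pvAdjA (V : List (List Int)) (E : List (List Int × List Int)) : PySem.Dict (List Int) (List (List Int)) :=
  E.foldl (fun d uv => d.modify uv.1 [] (· ++ [uv.2]))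
    (V.foldl (fun d v => d.insert v ([] : List (List Int))) PySem.Dict.empty)

-- the `while queue:` BFS loop, with fuel; the fuel the port passes is proven sufficient
-- (lemma pvBfsA_complete below), so the 0-fuel equation never decides the result.
def pvBfsA (adj : PySem.Dict (List Int) (List (List Int))) :
    Nat → List (List Int) → PySem.Set (List Int) → PySem.Set (List Int)
  | _, [], visited => visited
  | 0, _ :: _, visited => visited
  | fuel+1, node :: rest, visited =>
      if PySem.Set.contains visited node then pvBfsA adj fuel rest visited
      else pvBfsA adj fuel
        (rest ++ (PySem.Dict.getD adj node []).filter
          (fun n => !(PySem.Set.contains (PySem.Set.add visited node) n)))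
        (PySem.Set.add visited node)

-- `for out_v in outs:` with the early `return False`
def pvOutsLoopA (adj : PySem.Dict (List Int) (List (List Int))) (fuel : Nat)
    (ins : List (List Int)) : List (List Int) → Bool
  | [] => true
  | out_v :: rest =>
      if ins.all (fun in_v => PySem.Set.contains (pvBfsA adj fuel [out_v] PySem.Set.empty) in_v) then
        pvOutsLoopA adj fuel ins rest
      else false

-- Python's v[2]: inside Pre_ every v ∈ S has length ≥ 3, so `List.getD v 2 0` is exact there.
def check_all_outs_reach_all_ins (V : List (List Int)) (E : List (List Int × List Int)) (S : List (List Int)) : Bool :=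
  let adj := pvAdjA V E
  let outs := S.filter (fun v => List.getD v 2 0 == 1)
  let ins := S.filter (fun v => List.getD v 2 0 == -1)
  if ins.isEmpty then true
  else if outs.isEmpty then false
  else pvOutsLoopA adj ((V.length + E.length + S.length + 1) * (E.length + 1) + 1) ins outs

-- ===== PORT B =====
-- adj.setdefault(tuple(u), []).append(tuple(v))  (tuple(·) is the identity here: nodes ARE List Int)
def pvAdjB (E : List (List Int × List Int)) : PySem.Dict (List Int) (List (List Int)) :=
  E.foldl (fun d uv => d.modify uv.1 [] (· ++ [uv.2])) PySem.Dict.empty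

-- new = set(); for (a, b) in reach: for v in adj.get(b, ()): if (a, v) not in reach: new.add((a, v))
def pvNewB (adj : PySem.Dict (List Int) (List (List Int)))
    (reach : PySem.Set (List Int × List Int)) : PySem.Set (List Int × List Int) :=
  reach.foldl (fun acc p =>
    (PySem.Dict.getD adj p.2 []).foldl (fun acc v =>
      if PySem.Set.contains reach (p.1, v) then acc else PySem.Set.add acc (p.1, v)) acc)
    PySem.Set.empty

-- the bounded `for _ in range(…): … if not new: break … reach |= new` loop
def pvSatB (adj : PySem.Dict (List Int) (List (List Int))) :
    Nat → PySem.Set (List Int × List Int) → PySem.Set (List Int × List Int)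
  | 0, reach => reach
  | n+1, reach =>
      if (pvNewB adj reach).isEmpty then reach
      else pvSatB adj n (PySem.Set.union reach (pvNewB adj reach))

def check_all_outs_reach_all_ins_alt (V : List (List Int)) (E : List (List Int × List Int)) (S : List (List Int)) : Bool :=
  let outs := S.filter (fun v => List.getD v 2 0 == 1)
  let ins := S.filter (fun v => List.getD v 2 0 == -1)
  if ins.isEmpty then true
  else if outs.isEmpty then false
  else
    let adj := pvAdjB E
    let reach := pvSatB adj (S.length * (S.length + E.length) + 1)
      (outs.foldl (fun r o => PySem.Set.add r (o, o)) PySem.Set.empty)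
    outs.all (fun o => ins.all (fun i => PySem.Set.contains reach (o, i)))

-- ===== PRECONDITION & SPEC =====
-- Pre_ is exactly where the Python A returns: a row of S shorter than 3 makes `v[2]` raise IndexError.
def Pre_check_all_outs_reach_all_ins (V : List (List Int)) (E : List (List Int × List Int)) (S : List (List Int)) : Prop :=
  ∀ v ∈ S, 3 ≤ v.length
instance (V : List (List Int)) (E : List (List Int × List Int)) (S : List (List Int)) : Decidable (Pre_check_all_outs_reach_all_ins V E S) := by unfold Pre_check_all_outs_reach_all_ins; infer_instance

def pvWitness_check_all_outs_reach_all_ins : List (List Int) × (List (List Int × List Int)) × List (List Int) :=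
  ([[0, 0, 1], [1, 1, -1]], [([0, 0, 1], [1, 1, -1])], [[0, 0, 1], [1, 1, -1]])

def Spec_check_all_outs_reach_all_ins (V : List (List Int)) (E : List (List Int × List Int)) (S : List (List Int)) (out : Bool) : Prop := out = check_all_outs_reach_all_ins_alt V E S
instance (V : List (List Int)) (E : List (List Int × List Int)) (S : List (List Int)) (out : Bool) : Decidable (Spec_check_all_outs_reach_all_ins V E S out) := by unfold Spec_check_all_outs_reach_all_ins; infer_instance

-- ===== CLAIM (what is proved, stated in full; the proofs are below) =====
def Claim_equal_check_all_outs_reach_all_ins : Prop := ∀ (V : List (List Int)) (E : List (List Int × List Int)) (S : List (List Int)), Dom_check_all_outs_reach_all_ins V E S → Pre_check_all_outs_reach_all_ins V E S → Spec_check_all_outs_reach_all_ins V E S (check_all_outs_reach_all_ins V E S)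

-- ===== LEMMAS AND PROOFS =====

-- the edge relation of the graph and reachability along it
def EdgeR (E : List (List Int × List Int)) (a b : List Int) : Prop := (a, b) ∈ E
def ReachR (E : List (List Int × List Int)) : List Int → List Int → Prop :=
  Relation.ReflTransGen (EdgeR E)

-- ---------- both adjacency dicts map u to the targets of u's edges ----------

lemma getD_foldl_insert_nil (V : List (List Int)) :
    ∀ (d : PySem.Dict (List Int) (List (List Int))),
      (∀ u, d.getD u [] = []) →
      ∀ u, (V.foldl (fun d v => d.insert v ([] : List (List Int))) d).getD u [] = [] := by
  induction V with
  | nil => intro d h u; exact h u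
  | cons v V ih =>
      intro d h u
      refine ih _ (fun w => ?_) u
      rw [PySem.Dict.getD_insert]
      split
      · rfl
      · exact h w

lemma getD_adjA (V : List (List Int)) (E : List (List Int × List Int)) (u : List Int) :
    (pvAdjA V E).getD u [] = (E.filter (fun p => p.1 == u)).map Prod.snd := by
  unfold pvAdjA
  rw [PySem.Dict.getD_foldl_modify_append]
  rw [getD_foldl_insert_nil V PySem.Dict.empty (fun w => by simp [PySem.Dict.getD_empty])]
  simp

lemma getD_adjB (E : List (List Int × List Int)) (u : List Int) :
    (pvAdjB E).getD u [] = (E.filter (fun p => p.1 == u)).map Prod.snd := by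
  unfold pvAdjB
  rw [PySem.Dict.getD_foldl_modify_append]
  simp [PySem.Dict.getD_empty]

lemma mem_filter_map_snd (E : List (List Int × List Int)) (u v : List Int) :
    v ∈ (E.filter (fun p => p.1 == u)).map Prod.snd ↔ (u, v) ∈ E := by
  simp only [List.mem_map, List.mem_filter, beq_iff_eq]
  constructor
  · rintro ⟨⟨a, b⟩, ⟨hm, rfl⟩, rfl⟩; exact hm
  · intro h; exact ⟨(u, v), ⟨h, rfl⟩, rfl⟩

lemma mem_adjA (V : List (List Int)) (E : List (List Int × List Int)) (u v : List Int) :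
    v ∈ (pvAdjA V E).getD u [] ↔ (u, v) ∈ E := by
  rw [getD_adjA]; exact mem_filter_map_snd E u v

lemma mem_adjB (E : List (List Int × List Int)) (u v : List Int) :
    v ∈ (pvAdjB E).getD u [] ↔ (u, v) ∈ E := by
  rw [getD_adjB]; exact mem_filter_map_snd E u v

lemma len_adjA (V : List (List Int)) (E : List (List Int × List Int)) (u : List Int) :
    ((pvAdjA V E).getD u []).length ≤ E.length := by
  rw [getD_adjA]
  simpa using List.length_filter_le _ _

-- ---------- counting helpers ----------

lemma nodup_subset_length {α : Type} [DecidableEq α] {l u : List α}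
    (hnd : l.Nodup) (hsub : ∀ x ∈ l, x ∈ u) : l.length ≤ u.length := by
  calc l.length = l.toFinset.card := (List.toFinset_card_of_nodup hnd).symm
    _ ≤ u.toFinset.card := Finset.card_le_card (by
        intro x hx
        rw [List.mem_toFinset] at hx ⊢
        exact hsub x hx)
    _ ≤ u.length := u.toFinset_card_le

lemma length_lt_of_proper {α : Type} [DecidableEq α] {l u : List α}
    (hnd : l.Nodup) (hsub : ∀ x ∈ l, x ∈ u)
    {x : α} (hxu : x ∈ u) (hxl : x ∉ l) : l.length < u.length := by
  have h1 : (x :: l).Nodup := List.nodup_cons.mpr ⟨hxl, hnd⟩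
  have := nodup_subset_length h1 (by
    intro y hy
    rcases List.mem_cons.mp hy with rfl | hy
    · exact hxu
    · exact hsub y hy)
  simpa using this

lemma pv_all_congr {α : Type} (l : List α) (f g : α → Bool)
    (h : ∀ x ∈ l, f x = g x) : l.all f = l.all g := by
  induction l with
  | nil => rfl
  | cons a l ih =>
      simp only [List.all_cons]
      rw [h a List.mem_cons_self, ih (fun x hx => h x (List.mem_cons_of_mem _ hx))]

lemma pv_bool_eq {a b : Bool} (h : a = true ↔ b = true) : a = b := by
  cases a <;> cases b <;> simp_all

-- ---------- A side: the BFS visits exactly the nodes reachable from its start ----------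

lemma pvBfsA_sound (E : List (List Int × List Int))
    (adj : PySem.Dict (List Int) (List (List Int)))
    (hadj : ∀ u v, v ∈ adj.getD u [] ↔ (u, v) ∈ E) (o : List Int) :
    ∀ (fuel : Nat) (queue : List (List Int)) (visited : PySem.Set (List Int)),
      (∀ q ∈ queue, ReachR E o q) → (∀ y ∈ visited, ReachR E o y) →
      ∀ x ∈ pvBfsA adj fuel queue visited, ReachR E o x := by
  intro fuel
  induction fuel with
  | zero =>
      intro queue visited hq hv x hx
      cases queue <;> exact hv x (by simpa [pvBfsA] using hx)
  | succ f ih =>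
      intro queue visited hq hv x hx
      cases queue with
      | nil => exact hv x (by simpa [pvBfsA] using hx)
      | cons n rest =>
          by_cases hc : PySem.Set.contains visited n
          · rw [pvBfsA, if_pos hc] at hx
            exact ih rest visited (fun q hqm => hq q (List.mem_cons_of_mem _ hqm)) hv x hx
          · rw [pvBfsA, if_neg hc] at hx
            have hon : ReachR E o n := hq n List.mem_cons_self
            refine ih _ _ ?_ ?_ x hx
            · intro q hqm
              rcases List.mem_append.mp hqm with hqm | hqm
              · exact hq q (List.mem_cons_of_mem _ hqm)
              · have hmem := List.mem_of_mem_filter hqm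
                rw [hadj] at hmem
                exact Relation.ReflTransGen.tail hon hmem
            · intro y hy
              rcases (PySem.Set.mem_add _ _ _).mp hy with hy | rfl
              · exact hv y hy
              · exact hon

lemma pvBfsA_complete (E : List (List Int × List Int))
    (adj : PySem.Dict (List Int) (List (List Int)))
    (hadj : ∀ u v, v ∈ adj.getD u [] ↔ (u, v) ∈ E)
    (hlen : ∀ u, (adj.getD u []).length ≤ E.length)
    (U : List (List Int)) (hUt : ∀ u v, (u, v) ∈ E → v ∈ U) :
    ∀ (fuel : Nat) (queue : List (List Int)) (visited : PySem.Set (List Int)),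
      (∀ x ∈ queue, x ∈ U) → (∀ x ∈ visited, x ∈ U) → visited.Nodup →
      (∀ u ∈ visited, ∀ v, (u, v) ∈ E → v ∈ visited ∨ v ∈ queue) →
      queue.length + (U.length - visited.length) * (E.length + 1) ≤ fuel →
      (∀ q ∈ queue, q ∈ pvBfsA adj fuel queue visited) ∧
      (∀ x ∈ visited, x ∈ pvBfsA adj fuel queue visited) ∧
      (∀ u ∈ pvBfsA adj fuel queue visited, ∀ v, (u, v) ∈ E → v ∈ pvBfsA adj fuel queue visited) := by
  intro fuel
  induction fuel with
  | zero =>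
      intro queue visited hqU hvU hnd hinv hfuel
      cases queue with
      | nil =>
          refine ⟨by simp, by simp [pvBfsA], ?_⟩
          intro u hu v hv
          rcases hinv u (by simpa [pvBfsA] using hu) v hv with h | h
          · simpa [pvBfsA] using h
          · simp at h
      | cons n rest =>
          exfalso
          simp only [List.length_cons] at hfuel
          omega
  | succ f ih =>
      intro queue visited hqU hvU hnd hinv hfuel
      cases queue with
      | nil =>
          refine ⟨by simp, by simp [pvBfsA], ?_⟩
          intro u hu v hv
          rcases hinv u (by simpa [pvBfsA] using hu) v hv with h | h
          · simpa [pvBfsA] using h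
          · simp at h
      | cons n rest =>
          by_cases hc : PySem.Set.contains visited n
          · have hnvis : n ∈ visited := (PySem.Set.contains_iff _ _).mp hc
            rw [pvBfsA, if_pos hc]
            obtain ⟨h1, h2, h3⟩ := ih rest visited
              (fun x hx => hqU x (List.mem_cons_of_mem _ hx)) hvU hnd
              (by
                intro u hu v hv
                rcases hinv u hu v hv with h | h
                · exact Or.inl h
                · rcases List.mem_cons.mp h with rfl | h
                  · exact Or.inl hnvis
                  · exact Or.inr h)
              (by
                simp only [List.length_cons] at hfuel
                omega)
            refine ⟨?_, h2, h3⟩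
            intro q hq
            rcases List.mem_cons.mp hq with rfl | hq
            · exact h2 q hnvis
            · exact h1 q hq
          · have hnvis : n ∉ visited := fun h => hc ((PySem.Set.contains_iff _ _).mpr h)
            rw [pvBfsA, if_neg hc]
            have hadd : PySem.Set.add visited n = visited ++ [n] :=
              PySem.Set.add_of_not_mem hnvis
            have hnU : n ∈ U := hqU n List.mem_cons_self
            have hlt : visited.length < U.length :=
              length_lt_of_proper hnd hvU hnU hnvis
            have hlenadd : (PySem.Set.add visited n).length = visited.length + 1 := by
              rw [hadd]; simp
            have hnbrs : ((adj.getD n []).filter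
                (fun v => !(PySem.Set.contains (PySem.Set.add visited n) v))).length ≤ E.length :=
              le_trans (List.length_filter_le _ _) (hlen n)
            obtain ⟨h1, h2, h3⟩ := ih
              (rest ++ (adj.getD n []).filter
                (fun v => !(PySem.Set.contains (PySem.Set.add visited n) v)))
              (PySem.Set.add visited n)
              (by
                intro x hx
                rcases List.mem_append.mp hx with hx | hx
                · exact hqU x (List.mem_cons_of_mem _ hx)
                · exact hUt n x ((hadj n x).mp (List.mem_of_mem_filter hx)))
              (by
                intro x hx
                rcases (PySem.Set.mem_add _ _ _).mp hx with hx | rfl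
                · exact hvU x hx
                · exact hnU)
              (PySem.Set.nodup_add _ _ hnd)
              (by
                intro u hu v hv
                rcases (PySem.Set.mem_add _ _ _).mp hu with hu | rfl
                · rcases hinv u hu v hv with h | h
                  · exact Or.inl ((PySem.Set.mem_add _ _ _).mpr (Or.inl h))
                  · rcases List.mem_cons.mp h with rfl | h
                    · exact Or.inl ((PySem.Set.mem_add _ _ _).mpr (Or.inr rfl))
                    · exact Or.inr (List.mem_append.mpr (Or.inl h))
                · have hvadj : v ∈ adj.getD u [] := (hadj u v).mpr hv
                  by_cases hcv : PySem.Set.contains (PySem.Set.add visited u) v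
                  · exact Or.inl ((PySem.Set.contains_iff _ _).mp hcv)
                  · refine Or.inr (List.mem_append.mpr (Or.inr ?_))
                    refine List.mem_filter.mpr ⟨hvadj, ?_⟩
                    simp only [Bool.not_eq_true] at hcv
                    rw [hcv]; rfl)
              (by
                have hsplit : (U.length - visited.length) * (E.length + 1)
                    = (U.length - (visited.length + 1)) * (E.length + 1) + (E.length + 1) := by
                  have h' : U.length - visited.length = (U.length - (visited.length + 1)) + 1 := by
                    omega
                  rw [h', Nat.succ_mul]
                rw [hlenadd]
                simp only [List.length_cons] at hfuel
                rw [hsplit] at hfuel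
                simp only [List.length_append]
                omega)
            refine ⟨?_, ?_, h3⟩
            · intro q hq
              rcases List.mem_cons.mp hq with rfl | hq
              · exact h2 q ((PySem.Set.mem_add _ _ _).mpr (Or.inr rfl))
              · exact h1 q (List.mem_append.mpr (Or.inl hq))
            · intro x hx
              exact h2 x ((PySem.Set.mem_add _ _ _).mpr (Or.inl hx))

lemma pvBfsA_iff (E : List (List Int × List Int))
    (adj : PySem.Dict (List Int) (List (List Int)))
    (hadj : ∀ u v, v ∈ adj.getD u [] ↔ (u, v) ∈ E)
    (hlen : ∀ u, (adj.getD u []).length ≤ E.length)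
    (o x : List Int) (F : Nat)
    (hF : (PySem.Set.ofList (o :: E.map Prod.snd)).length * (E.length + 1) + 1 ≤ F) :
    x ∈ pvBfsA adj F [o] PySem.Set.empty ↔ ReachR E o x := by
  constructor
  · intro hx
    refine pvBfsA_sound E adj hadj o F [o] PySem.Set.empty ?_ ?_ x hx
    · intro q hq
      rcases List.mem_cons.mp hq with rfl | hq
      · exact Relation.ReflTransGen.refl
      · simp at hq
    · intro y hy; simp [PySem.Set.empty] at hy
  · intro hr
    obtain ⟨h1, _, h3⟩ := pvBfsA_complete E adj hadj hlen
      (PySem.Set.ofList (o :: E.map Prod.snd))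
      (by
        intro u v hv
        refine (PySem.Set.mem_ofList _ _).mpr ?_
        exact List.mem_cons_of_mem _ (List.mem_map.mpr ⟨(u, v), hv, rfl⟩))
      F [o] PySem.Set.empty
      (by
        intro q hq
        rcases List.mem_cons.mp hq with rfl | hq
        · exact (PySem.Set.mem_ofList _ _).mpr List.mem_cons_self
        · simp at hq)
      (by intro y hy; simp [PySem.Set.empty] at hy)
      (by simp [PySem.Set.empty])
      (by intro u hu; simp [PySem.Set.empty] at hu)
      (by
        have h0 : (PySem.Set.empty : PySem.Set (List Int)).length = 0 := rfl
        simp only [List.length_cons, List.length_nil, h0, Nat.sub_zero]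
        omega)
    have ho : o ∈ pvBfsA adj F [o] PySem.Set.empty := h1 o List.mem_cons_self
    induction hr with
    | refl => exact ho
    | tail hab e ihx => exact h3 _ ihx _ e

lemma pvOutsLoopA_eq (adj : PySem.Dict (List Int) (List (List Int))) (fuel : Nat)
    (ins : List (List Int)) :
    ∀ outs, pvOutsLoopA adj fuel ins outs =
      outs.all (fun o => ins.all (fun i =>
        PySem.Set.contains (pvBfsA adj fuel [o] PySem.Set.empty) i)) := by
  intro outs
  induction outs with
  | nil => rfl
  | cons o rest ih =>
      rw [pvOutsLoopA, List.all_cons]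
      by_cases h : ins.all (fun i => PySem.Set.contains (pvBfsA adj fuel [o] PySem.Set.empty) i)
      · rw [if_pos h, h, ih]; simp
      · rw [if_neg h]
        simp only [Bool.not_eq_true] at h
        rw [h]; simp

-- ---------- B side: the saturated pair set holds exactly the reachable pairs ----------

lemma mem_innerB (reach : PySem.Set (List Int × List Int)) (a : List Int) :
    ∀ (l : List (List Int)) (acc : PySem.Set (List Int × List Int)) (x : List Int × List Int),
      x ∈ l.foldl (fun acc v =>
          if PySem.Set.contains reach (a, v) then acc else PySem.Set.add acc (a, v)) acc ↔
        x ∈ acc ∨ ∃ v ∈ l, x = (a, v) ∧ (a, v) ∉ reach := by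
  intro l
  induction l with
  | nil => intro acc x; simp
  | cons v l ih =>
      intro acc x
      rw [List.foldl_cons]
      by_cases hc : PySem.Set.contains reach (a, v)
      · have hm : (a, v) ∈ reach := (PySem.Set.contains_iff _ _).mp hc
        rw [if_pos hc, ih]
        constructor
        · rintro (h | ⟨w, hw, rfl, hn⟩)
          · exact Or.inl h
          · exact Or.inr ⟨w, List.mem_cons_of_mem _ hw, rfl, hn⟩
        · rintro (h | ⟨w, hw, rfl, hn⟩)
          · exact Or.inl h
          · rcases List.mem_cons.mp hw with rfl | hw
            · exact absurd hm hn
            · exact Or.inr ⟨w, hw, rfl, hn⟩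
      · have hm : (a, v) ∉ reach := fun h => hc ((PySem.Set.contains_iff _ _).mpr h)
        rw [if_neg hc, ih]
        constructor
        · rintro (h | ⟨w, hw, rfl, hn⟩)
          · rcases (PySem.Set.mem_add _ _ _).mp h with h | rfl
            · exact Or.inl h
            · exact Or.inr ⟨v, List.mem_cons_self, rfl, hm⟩
          · exact Or.inr ⟨w, List.mem_cons_of_mem _ hw, rfl, hn⟩
        · rintro (h | ⟨w, hw, rfl, hn⟩)
          · exact Or.inl ((PySem.Set.mem_add _ _ _).mpr (Or.inl h))
          · rcases List.mem_cons.mp hw with rfl | hw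
            · exact Or.inl ((PySem.Set.mem_add _ _ _).mpr (Or.inr rfl))
            · exact Or.inr ⟨w, hw, rfl, hn⟩

lemma mem_newB_aux (adj : PySem.Dict (List Int) (List (List Int)))
    (reach : PySem.Set (List Int × List Int)) :
    ∀ (L : List (List Int × List Int)) (acc : PySem.Set (List Int × List Int))
      (x : List Int × List Int),
      x ∈ L.foldl (fun acc p =>
          (PySem.Dict.getD adj p.2 []).foldl (fun acc v =>
            if PySem.Set.contains reach (p.1, v) then acc
            else PySem.Set.add acc (p.1, v)) acc) acc ↔
        x ∈ acc ∨ ∃ p ∈ L, ∃ v ∈ adj.getD p.2 [], x = (p.1, v) ∧ (p.1, v) ∉ reach := by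
  intro L
  induction L with
  | nil => intro acc x; simp
  | cons p L ih =>
      intro acc x
      rw [List.foldl_cons, ih, mem_innerB]
      constructor
      · rintro ((h | ⟨v, hv, rfl, hn⟩) | ⟨q, hq, v, hv, rfl, hn⟩)
        · exact Or.inl h
        · exact Or.inr ⟨p, List.mem_cons_self, v, hv, rfl, hn⟩
        · exact Or.inr ⟨q, List.mem_cons_of_mem _ hq, v, hv, rfl, hn⟩
      · rintro (h | ⟨q, hq, v, hv, rfl, hn⟩)
        · exact Or.inl (Or.inl h)
        · rcases List.mem_cons.mp hq with rfl | hq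
          · exact Or.inl (Or.inr ⟨v, hv, rfl, hn⟩)
          · exact Or.inr ⟨q, hq, v, hv, rfl, hn⟩

lemma mem_newB (adj : PySem.Dict (List Int) (List (List Int)))
    (reach : PySem.Set (List Int × List Int)) (x : List Int × List Int) :
    x ∈ pvNewB adj reach ↔
      ∃ p ∈ reach, ∃ v ∈ adj.getD p.2 [], x = (p.1, v) ∧ (p.1, v) ∉ reach := by
  unfold pvNewB
  rw [mem_newB_aux]
  simp [PySem.Set.empty]

lemma newB_isEmpty_closed (adj : PySem.Dict (List Int) (List (List Int)))
    (reach : PySem.Set (List Int × List Int))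
    (h : (pvNewB adj reach).isEmpty = true) :
    ∀ p ∈ reach, ∀ v ∈ adj.getD p.2 [], (p.1, v) ∈ reach := by
  intro p hp v hv
  by_contra hn
  have hmem : (p.1, v) ∈ pvNewB adj reach :=
    (mem_newB adj reach _).mpr ⟨p, hp, v, hv, rfl, hn⟩
  rw [List.isEmpty_iff] at h
  rw [h] at hmem
  simp at hmem

lemma pvSatB_mono (adj : PySem.Dict (List Int) (List (List Int))) :
    ∀ (n : Nat) (r : PySem.Set (List Int × List Int)) (x : List Int × List Int),
      x ∈ r → x ∈ pvSatB adj n r := by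
  intro n
  induction n with
  | zero => intro r x hx; simpa [pvSatB] using hx
  | succ n ih =>
      intro r x hx
      rw [pvSatB]
      split
      · exact hx
      · exact ih _ x ((PySem.Set.mem_union _ _ _).mpr (Or.inl hx))

lemma pvSatB_sound (E : List (List Int × List Int))
    (adj : PySem.Dict (List Int) (List (List Int)))
    (hadj : ∀ u v, v ∈ adj.getD u [] ↔ (u, v) ∈ E) :
    ∀ (n : Nat) (r : PySem.Set (List Int × List Int)),
      (∀ p ∈ r, ReachR E p.1 p.2) → ∀ p ∈ pvSatB adj n r, ReachR E p.1 p.2 := by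
  intro n
  induction n with
  | zero => intro r h p hp; exact h p (by simpa [pvSatB] using hp)
  | succ n ih =>
      intro r h p hp
      rw [pvSatB] at hp
      split at hp
      · exact h p hp
      · refine ih _ ?_ p hp
        intro q hq
        rcases (PySem.Set.mem_union _ _ _).mp hq with hq | hq
        · exact h q hq
        · rcases (mem_newB adj r q).mp hq with ⟨s, hs, v, hv, rfl, -⟩
          exact Relation.ReflTransGen.tail (h s hs) ((hadj s.2 v).mp hv)

lemma pvSatB_isClosed (adj : PySem.Dict (List Int) (List (List Int)))
    (cap : List (List Int × List Int)) (hcapnd : cap.Nodup)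
    (hext : ∀ a b v, (a, b) ∈ cap → v ∈ adj.getD b [] → (a, v) ∈ cap) :
    ∀ (n : Nat) (r : PySem.Set (List Int × List Int)),
      r.Nodup → (∀ x ∈ r, x ∈ cap) → cap.length + 1 ≤ n + r.length →
      ∀ p ∈ pvSatB adj n r, ∀ v ∈ adj.getD p.2 [], (p.1, v) ∈ pvSatB adj n r := by
  intro n
  induction n with
  | zero =>
      intro r hnd hsub hlen
      exfalso
      have := nodup_subset_length hnd hsub
      omega
  | succ n ih =>
      intro r hnd hsub hlen
      rw [pvSatB]
      by_cases he : (pvNewB adj r).isEmpty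
      · rw [if_pos he]
        exact newB_isEmpty_closed adj r he
      · rw [if_neg he]
        have hne : pvNewB adj r ≠ [] := by
          intro h; rw [h] at he; simp at he
        obtain ⟨x, hx⟩ := List.exists_mem_of_ne_nil _ hne
        obtain ⟨p, hp, v, hv, hxeq, hxnr⟩ := (mem_newB adj r x).mp hx
        have hxcap : x ∈ cap := by
          rw [hxeq]; exact hext p.1 p.2 v (hsub p hp) hv
        have hxnr' : x ∉ r := by rw [hxeq]; exact hxnr
        have hnd' : (PySem.Set.union r (pvNewB adj r)).Nodup := PySem.Set.nodup_union _ _ hnd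
        have hsub' : ∀ y ∈ PySem.Set.union r (pvNewB adj r), y ∈ cap := by
          intro y hy
          rcases (PySem.Set.mem_union _ _ _).mp hy with hy | hy
          · exact hsub y hy
          · obtain ⟨q, hq, w, hw, rfl, -⟩ := (mem_newB adj r y).mp hy
            exact hext q.1 q.2 w (hsub q hq) hw
        have hxmem : x ∈ PySem.Set.union r (pvNewB adj r) :=
          (PySem.Set.mem_union _ _ _).mpr (Or.inr hx)
        have hgrow : r.length < (PySem.Set.union r (pvNewB adj r)).length :=
          length_lt_of_proper hnd
            (fun y hy => (PySem.Set.mem_union _ _ _).mpr (Or.inl hy)) hxmem hxnr'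
        exact ih _ hnd' hsub' (by omega)

-- ===== VERDICT (by name: the statement is the Claim_ definition above) =====
theorem check_all_outs_reach_all_ins_spec : Claim_equal_check_all_outs_reach_all_ins := by
  intro V E S _ _
  unfold Spec_check_all_outs_reach_all_ins
  unfold check_all_outs_reach_all_ins check_all_outs_reach_all_ins_alt
  by_cases hi : (S.filter (fun v => List.getD v 2 0 == (-1 : Int))).isEmpty
  · simp only [hi, if_true]
  · simp only [Bool.not_eq_true] at hi
    by_cases ho : (S.filter (fun v => List.getD v 2 0 == (1 : Int))).isEmpty
    · simp only [hi, ho, Bool.false_eq_true, if_false, if_true]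
    · simp only [Bool.not_eq_true] at ho
      simp only [hi, ho, Bool.false_eq_true, if_false]
      rw [pvOutsLoopA_eq]
      apply pv_all_congr
      intro o homem
      apply pv_all_congr
      intro i himem
      have hoS : o ∈ S := (List.mem_filter.mp homem).1
      -- BFS side
      have hUlen : (PySem.Set.ofList (o :: E.map Prod.snd)).length ≤ E.length + 1 := by
        have := PySem.Set.length_ofList_le (o :: E.map Prod.snd)
        simpa using this
      have hF : (PySem.Set.ofList (o :: E.map Prod.snd)).length * (E.length + 1) + 1 ≤
          (V.length + E.length + S.length + 1) * (E.length + 1) + 1 := by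
        have h1 : (PySem.Set.ofList (o :: E.map Prod.snd)).length * (E.length + 1) ≤
            (E.length + 1) * (E.length + 1) := Nat.mul_le_mul_right _ hUlen
        have h2 : (E.length + 1) * (E.length + 1) ≤
            (V.length + E.length + S.length + 1) * (E.length + 1) :=
          Nat.mul_le_mul_right _ (by omega)
        omega
      have hbfs := pvBfsA_iff E (pvAdjA V E) (mem_adjA V E) (len_adjA V E) o i
        ((V.length + E.length + S.length + 1) * (E.length + 1) + 1) hF
      -- saturation side
      have hseed_mem : ∀ x ∈ (S.filter (fun v => List.getD v 2 0 == (1 : Int))).foldl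
          (fun r o => PySem.Set.add r (o, o)) PySem.Set.empty,
          ∃ b ∈ S.filter (fun v => List.getD v 2 0 == (1 : Int)), x = (b, b) := by
        intro x hx
        have := (PySem.Set.mem_foldl_add _ (fun o => (o, o)) _ _).mp hx
        rcases this with h | ⟨b, hb, rfl⟩
        · simp [PySem.Set.empty] at h
        · exact ⟨b, hb, rfl⟩
      have hseed_nodup : ((S.filter (fun v => List.getD v 2 0 == (1 : Int))).foldl
          (fun r o => PySem.Set.add r (o, o)) PySem.Set.empty).Nodup := by
        rw [← PySem.Set.update_map_eq_foldl_add,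
          show (PySem.Set.empty : PySem.Set (List Int × List Int)) = [] from rfl,
          PySem.Set.update_nil_left]
        exact PySem.Set.nodup_ofList _
      have hsat_sound := pvSatB_sound E (pvAdjB E) (mem_adjB E)
        (S.length * (S.length + E.length) + 1)
        ((S.filter (fun v => List.getD v 2 0 == (1 : Int))).foldl
          (fun r o => PySem.Set.add r (o, o)) PySem.Set.empty)
        (by
          intro p hp
          obtain ⟨b, -, rfl⟩ := hseed_mem p hp
          exact Relation.ReflTransGen.refl)
      have hcap_nd : ((PySem.List.dedup S) ×ˢ
          (PySem.List.dedup (S ++ E.map Prod.snd))).Nodup :=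
        List.Nodup.product (PySem.List.nodup_dedup S) (PySem.List.nodup_dedup _)
      have hcap_ext : ∀ a b v, (a, b) ∈ (PySem.List.dedup S) ×ˢ
            (PySem.List.dedup (S ++ E.map Prod.snd)) →
          v ∈ (pvAdjB E).getD b [] →
          (a, v) ∈ (PySem.List.dedup S) ×ˢ (PySem.List.dedup (S ++ E.map Prod.snd)) := by
        intro a b v hab hv
        have h1 := (List.mem_product.mp hab).1
        have h2 : (b, v) ∈ E := (mem_adjB E b v).mp hv
        refine List.mem_product.mpr ⟨h1, ?_⟩
        rw [PySem.List.mem_dedup]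
        exact List.mem_append.mpr (Or.inr (List.mem_map.mpr ⟨(b, v), h2, rfl⟩))
      have hcap_len : ((PySem.List.dedup S) ×ˢ
          (PySem.List.dedup (S ++ E.map Prod.snd))).length ≤
          S.length * (S.length + E.length) := by
        rw [List.length_product]
        have h1 : (PySem.List.dedup S).length ≤ S.length := by
          rw [PySem.List.dedup_eq_ofList]; exact PySem.Set.length_ofList_le S
        have h2 : (PySem.List.dedup (S ++ E.map Prod.snd)).length ≤ S.length + E.length := by
          rw [PySem.List.dedup_eq_ofList]
          have := PySem.Set.length_ofList_le (S ++ E.map Prod.snd)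
          simpa using this
        exact Nat.mul_le_mul h1 h2
      have hsat_closed := pvSatB_isClosed (pvAdjB E)
        ((PySem.List.dedup S) ×ˢ (PySem.List.dedup (S ++ E.map Prod.snd)))
        hcap_nd hcap_ext
        (S.length * (S.length + E.length) + 1)
        ((S.filter (fun v => List.getD v 2 0 == (1 : Int))).foldl
          (fun r o => PySem.Set.add r (o, o)) PySem.Set.empty)
        hseed_nodup
        (by
          intro x hx
          obtain ⟨b, hb, rfl⟩ := hseed_mem x hx
          have hbS : b ∈ S := (List.mem_filter.mp hb).1
          refine List.mem_product.mpr ⟨?_, ?_⟩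
          · rw [PySem.List.mem_dedup]; exact hbS
          · rw [PySem.List.mem_dedup]; exact List.mem_append.mpr (Or.inl hbS))
        (by omega)
      apply pv_bool_eq
      rw [PySem.Set.contains_iff, PySem.Set.contains_iff, hbfs]
      constructor
      · intro hr
        clear hbfs himem
        induction hr with
        | refl =>
            exact pvSatB_mono (pvAdjB E) _ _ _
              ((PySem.Set.mem_foldl_add _ (fun o => (o, o)) _ _).mpr (Or.inr ⟨o, homem, rfl⟩))
        | tail hab e ihx =>
            exact hsat_closed _ ihx _ ((mem_adjB E _ _).mpr e)
      · intro hmem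
        exact hsat_sound _ hmem
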